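-- pv_equiv track=rewrite | github.com/devty/MidiTok | src/miditok/utils/structured_utils.py | get_instrument_type_from_program
-- ===== SOURCE A (Python) =====
-- PROGRAM_RANGES = {
--     "piano": (0, 7),
--     "chromatic percussion": (8, 15), # Renamed from percussion for clarity based on GM
--     "organ": (16, 23),
--     "guitar": (24, 31),
--     "bass": (32, 39),
--     "strings": (40, 47),
--     "ensemble": (48, 55),
--     "brass": (56, 63),
--     "reed": (64, 71), # Renamed from woodwinds based on GM groups
--     "pipe": (72, 79), # Renamed from woodwinds based on GM groups
--     "synth lead": (80, 87),
--     "synth pad": (88, 95),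
--     "synth effects": (96, 103),
--     "ethnic": (104, 111),
--     "percussive": (112, 119),
--     "sound effects": (120, 127),
--     # Add drum kit as a special case if needed, though program numbers overlap percussion
--     "drum kit": (-1, -1) # Use -1 as a pseudo-program for drums
-- }
--
-- def get_instrument_type_from_program(program: int) -> str:
--     """
--     Determine instrument type (GM family name) from MIDI program number.
--     Returns 'drum kit' if program is -1 (common convention for drum tracks).
--     """
--     if program == -1: # Explicit check for drum track convention
--         return "drum kit"
--     for family, (start, end) in PROGRAM_RANGES.items():
--         # Skip drum kit range here as we handled -1 explicitly
--         if family == "drum kit": continue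
--         if start <= program <= end:
--             return family
--
--     return "unknown"
-- ===== SOURCE B (Python) =====
-- FAMILIES = [
--     "piano", "chromatic percussion", "organ", "guitar",
--     "bass", "strings", "ensemble", "brass",
--     "reed", "pipe", "synth lead", "synth pad",
--     "synth effects", "ethnic", "percussive", "sound effects",
-- ]
--
-- def get_instrument_type_from_program(program: int) -> str:
--     if program == -1:
--         return "drum kit"
--     if 0 <= program <= 127:
--         return FAMILIES[program // 8]
--     return "unknown"
-- ===== Notes on version B (the rewrite author's own statement) =====
-- stated objective: simpler
-- what changed: Replaces the linear scan over the range dict (with a skip branch for the drum-kit pseudo-entry) by a single arithmetic index, program floor-divided by the family width, into a list of family names.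
import Mathlib
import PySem

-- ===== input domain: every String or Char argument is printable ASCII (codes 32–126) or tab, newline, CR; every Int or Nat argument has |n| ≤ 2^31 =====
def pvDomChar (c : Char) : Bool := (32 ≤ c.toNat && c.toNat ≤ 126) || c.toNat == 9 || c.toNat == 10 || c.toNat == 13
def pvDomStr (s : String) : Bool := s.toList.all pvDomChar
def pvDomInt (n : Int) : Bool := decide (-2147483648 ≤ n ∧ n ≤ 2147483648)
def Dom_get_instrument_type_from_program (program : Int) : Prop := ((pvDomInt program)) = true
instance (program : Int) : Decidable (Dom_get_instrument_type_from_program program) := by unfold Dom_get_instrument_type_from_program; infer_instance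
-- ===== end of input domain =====

-- B replaces A's linear scan over the GM range table by a direct arithmetic index program // 8 into a 16-name list (simpler, closed-form).
-- ===== PORT A =====
-- The PROGRAM_RANGES dict as an association list (insertion order), as in A.
def PROGRAM_RANGES : List (String × (Int × Int)) :=
  [("piano", (0, 7)), ("chromatic percussion", (8, 15)), ("organ", (16, 23)),
   ("guitar", (24, 31)), ("bass", (32, 39)), ("strings", (40, 47)),
   ("ensemble", (48, 55)), ("brass", (56, 63)), ("reed", (64, 71)),
   ("pipe", (72, 79)), ("synth lead", (80, 87)), ("synth pad", (88, 95)),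
   ("synth effects", (96, 103)), ("ethnic", (104, 111)), ("percussive", (112, 119)),
   ("sound effects", (120, 127)), ("drum kit", (-1, -1))]

-- the 'for family, (start, end) in PROGRAM_RANGES.items():' loop with early return
def rangeScan (program : Int) : List (String × (Int × Int)) → String
  | [] => "unknown"
  | (family, (start, end_)) :: rest =>
    if family = "drum kit" then rangeScan program rest   -- continue
    else if start ≤ program ∧ program ≤ end_ then family
    else rangeScan program rest

def get_instrument_type_from_program (program : Int) : String :=
  if program = -1 then "drum kit"
  else rangeScan program PROGRAM_RANGES

-- ===== PORT B =====
-- B: closed-form table lookup, index program // 8 (Python floor division).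
def FAMILIES : List String :=
  ["piano", "chromatic percussion", "organ", "guitar",
   "bass", "strings", "ensemble", "brass",
   "reed", "pipe", "synth lead", "synth pad",
   "synth effects", "ethnic", "percussive", "sound effects"]

def get_instrument_type_from_program_alt (program : Int) : String :=
  if program = -1 then "drum kit"
  else if 0 ≤ program ∧ program ≤ 127 then
    -- in-range index: FAMILIES[program // 8] never raises, .getD is unreachable
    (PySem.List.pyGet? FAMILIES (PySem.Int.floordiv program 8)).getD "unknown"
  else "unknown"

-- ===== PRECONDITION & SPEC =====
def Spec_get_instrument_type_from_program (program : Int) (out : String) : Prop := out = get_instrument_type_from_program_alt program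
instance (program : Int) (out : String) : Decidable (Spec_get_instrument_type_from_program program out) := by unfold Spec_get_instrument_type_from_program; infer_instance

-- ===== CLAIM (what is proved, stated in full; the proofs are below) =====
def Claim_equal_get_instrument_type_from_program : Prop := ∀ (program : Int), Dom_get_instrument_type_from_program program → Spec_get_instrument_type_from_program program (get_instrument_type_from_program program)

-- ===== LEMMAS AND PROOFS =====
theorem rangeScan_out (program : Int) (l : List (String × (Int × Int)))
    (h : ∀ p ∈ l, ¬ (p.2.1 ≤ program ∧ program ≤ p.2.2)) :
    rangeScan program l = "unknown" := by
  induction l with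
  | nil => rfl
  | cons hd tl ih =>
    obtain ⟨family, start, end_⟩ := hd
    rw [rangeScan]
    have hhd := h (family, start, end_) (List.mem_cons_self ..)
    rw [if_neg hhd]
    split
    · exact ih (fun p hp => h p (List.mem_cons_of_mem _ hp))
    · exact ih (fun p hp => h p (List.mem_cons_of_mem _ hp))

-- ===== VERDICT (by name: the statement is the Claim_ definition above) =====
theorem get_instrument_type_from_program_spec : Claim_equal_get_instrument_type_from_program := by
  intro program _
  unfold Spec_get_instrument_type_from_program
  by_cases h1 : program = -1
  · simp [get_instrument_type_from_program, get_instrument_type_from_program_alt, h1]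
  · by_cases h2 : 0 ≤ program ∧ program ≤ 127
    · obtain ⟨hl, hu⟩ := h2
      interval_cases program <;> rfl
    · rw [get_instrument_type_from_program, get_instrument_type_from_program_alt,
        if_neg h1, if_neg h1, if_neg h2,
        rangeScan_out program PROGRAM_RANGES]
      intro p hp
      simp only [PROGRAM_RANGES, List.mem_cons, List.not_mem_nil, or_false] at hp
      rcases hp with h|h|h|h|h|h|h|h|h|h|h|h|h|h|h|h|h <;> subst h <;> simp <;> omega
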